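-- pv_equiv track=rewrite | github.com/amirhallaji/Artificial-Intelligence-Genetic | Population Rate/main.py | choose_survivals
-- ===== SOURCE A (Python) =====
-- def choose_survivals(population: list, error_values: list):
--     pop_with_error = []
--     for i in range(0, len(population)):
--         pop_with_error.append(error_values[i] + population[i])
--
--     pop_with_error.sort(key=lambda x: x[0])
--
--     for i in range(0, int(len(pop_with_error)/5)):
--         pop_with_error.pop()
--
--
--     return pop_with_error
-- ===== SOURCE B (Python) =====
-- import heapq
--
--
-- def choose_survivals(population: list, error_values: list):
--     # keep the len(population) - len(population)//5 individuals with smallest error: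
--     # a bounded-size heap selection instead of a full sort followed by repeated pop()
--     combined = [e + p for e, p in zip(error_values, population)]
--     keep = len(population) - len(population) // 5
--     return heapq.nsmallest(keep, combined, key=lambda x: x[0])
-- ===== Notes on version B (the rewrite author's own statement) =====
-- stated objective: idiomatic
-- what changed: B builds the combined rows with zip, computes the survivor count k = n - n//5 directly, and selects the k smallest-error rows with heapq.nsmallest (a bounded size-k heap) instead of fully sorting and then popping off the worst n//5 one by one.
import Mathlib
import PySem

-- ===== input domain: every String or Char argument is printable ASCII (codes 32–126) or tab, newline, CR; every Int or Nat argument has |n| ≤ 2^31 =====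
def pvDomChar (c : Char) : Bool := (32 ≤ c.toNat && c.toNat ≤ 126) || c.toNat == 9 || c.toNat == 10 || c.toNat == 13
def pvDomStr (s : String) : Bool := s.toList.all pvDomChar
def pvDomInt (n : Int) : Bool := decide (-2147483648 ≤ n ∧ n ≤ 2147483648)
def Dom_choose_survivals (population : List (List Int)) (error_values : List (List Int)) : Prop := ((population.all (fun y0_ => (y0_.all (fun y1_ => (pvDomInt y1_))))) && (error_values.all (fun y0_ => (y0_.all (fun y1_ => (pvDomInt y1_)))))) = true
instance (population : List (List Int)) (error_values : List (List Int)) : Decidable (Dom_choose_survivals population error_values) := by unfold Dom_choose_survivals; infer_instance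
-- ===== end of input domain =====

-- B replaces A's full-sort-then-pop-the-worst loop by zip + heapq.nsmallest of the k = n - n//5 kept rows (idiomatic selection).

-- ===== PORT A =====
def choose_survivals (population : List (List Int)) (error_values : List (List Int)) : List (List Int) :=
  -- for i in range(0, len(population)): pop_with_error.append(error_values[i] + population[i])
  let pop_with_error : List (List Int) :=
    (PySem.List.pyRange 0 (population.length : Int) 1).foldl
      (fun acc i => acc ++ [PySem.List.pyGetD error_values i [] ++ PySem.List.pyGetD population i []]) []
  -- pop_with_error.sort(key=lambda x: x[0])  (x[0] raises on an empty row: excluded by Pre_)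
  let sortedL := PySem.List.sorted pop_with_error (fun x => PySem.List.pyGetD x 0 0) false
  -- for i in range(0, int(len(pop_with_error)/5)): pop_with_error.pop()
  (PySem.List.pyRange 0 (PySem.Int.truncdiv (sortedL.length : Int) 5) 1).foldl
    (fun acc _ => match PySem.List.pop? acc with
      | some (_, rest) => rest
      | none => acc)   -- unreachable: pop count ≤ length
    sortedL

-- ===== PORT B =====
-- heapq.nsmallest(k, xs, key): documented as equivalent to sorted(xs, key=key)[:k]
def nsmallestBy (k : Nat) (xs : List (List Int)) (key : List Int → Int) : List (List Int) :=
  (PySem.List.sorted xs key false).take k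

def choose_survivals_alt (population : List (List Int)) (error_values : List (List Int)) : List (List Int) :=
  let combined := (error_values.zip population).map (fun ep => ep.1 ++ ep.2)
  let keep := population.length - population.length / 5
  nsmallestBy keep combined (fun x => PySem.List.pyGetD x 0 0)

-- ===== PRECONDITION & SPEC =====
-- Pre_ excludes exactly the inputs where A raises an IndexError: error_values shorter than
-- population (error_values[i]), or some combined row empty (the sort key x[0]).
def Pre_choose_survivals (population : List (List Int)) (error_values : List (List Int)) : Prop :=
  population.length ≤ error_values.length ∧
  ∀ p ∈ error_values.zip population, p.1 ++ p.2 ≠ []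
instance (population : List (List Int)) (error_values : List (List Int)) : Decidable (Pre_choose_survivals population error_values) := by unfold Pre_choose_survivals; infer_instance
def pvWitness_choose_survivals : List (List Int) × List (List Int) := ([[1], [2], [3]], [[9], [4], [7]])

def Spec_choose_survivals (population : List (List Int)) (error_values : List (List Int)) (out : List (List Int)) : Prop := out = choose_survivals_alt population error_values
instance (population : List (List Int)) (error_values : List (List Int)) (out : List (List Int)) : Decidable (Spec_choose_survivals population error_values out) := by unfold Spec_choose_survivals; infer_instance

-- ===== CLAIM (what is proved, stated in full; the proofs are below) =====
def Claim_equal_choose_survivals : Prop := ∀ (population : List (List Int)) (error_values : List (List Int)), Dom_choose_survivals population error_values → Pre_choose_survivals population error_values → Spec_choose_survivals population error_values (choose_survivals population error_values)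

-- ===== LEMMAS AND PROOFS =====

-- A's append loop builds exactly B's zip-comprehension (lengths permitting).
theorem combined_eq (population error_values : List (List Int))
    (hlen : population.length ≤ error_values.length) :
    (PySem.List.pyRange 0 (population.length : Int) 1).foldl
      (fun acc i => acc ++ [PySem.List.pyGetD error_values i [] ++ PySem.List.pyGetD population i []]) []
      = (error_values.zip population).map (fun ep => ep.1 ++ ep.2) := by
  rw [PySem.List.pyRange_zero_natCast, PySem.List.foldl_append_singleton_eq_map, List.map_map]
  apply List.ext_getElem
  · simp [List.length_zip]; omega
  · intro i h1 h2
    have hi : i < population.length := by simpa using h1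
    simp only [List.nil_append, List.getElem_map, List.getElem_range, Function.comp_apply,
      PySem.List.pyGetD_natCast, List.getElem_zip]
    rw [List.getD_eq_getElem _ _ (by omega), List.getD_eq_getElem _ _ hi]

-- popping the last element n times (n ≤ length) keeps the first length - n elements
theorem popLoop_eq_take (n : Nat) (ys : List (List Int)) (h : n ≤ ys.length) :
    (PySem.List.pyRange 0 (n : Int) 1).foldl
      (fun acc _ => match PySem.List.pop? acc with
        | some (_, rest) => rest
        | none => acc) ys = ys.take (ys.length - n) := by
  induction n with
  | zero => simp
  | succ m ih =>
    have hm : m ≤ ys.length := by omega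
    have hcast : ((m + 1 : Nat) : Int) = (m : Int) + 1 := by push_cast; ring
    rw [hcast, PySem.List.pyRange_one_succ_right (by positivity), List.foldl_append, ih hm]
    have hlen2 : (ys.take (ys.length - m)).length = ys.length - m :=
      List.length_take_of_le (by omega)
    have hne : ys.take (ys.length - m) ≠ [] := by
      intro h0; rw [h0] at hlen2; simp at hlen2; omega
    simp only [List.foldl_cons, List.foldl_nil]
    conv_lhs => rw [← List.dropLast_append_getLast hne]
    simp only [PySem.List.pop?_last]
    by_cases hcase : ys.length - m < ys.length
    · rw [List.dropLast_take hcase]; congr 1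
    · have hys : ys.take (ys.length - m) = ys := by
        rw [show ys.length - m = ys.length by omega, List.take_length]
      rw [hys, List.dropLast_eq_take]; congr 1; omega

-- ===== VERDICT =====
theorem choose_survivals_spec : Claim_equal_choose_survivals := by
  unfold Claim_equal_choose_survivals
  intro population error_values _ hpre
  obtain ⟨hlen, _⟩ := hpre
  unfold Spec_choose_survivals choose_survivals choose_survivals_alt nsmallestBy
  simp only [combined_eq population error_values hlen]
  set combined := (error_values.zip population).map (fun ep => ep.1 ++ ep.2) with hc
  have hclen : combined.length = population.length := by
    simp [hc, List.length_zip]; omega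
  have hslen : (PySem.List.sorted combined (fun x => PySem.List.pyGetD x 0 0) false).length
      = population.length := by rw [PySem.List.length_sorted, hclen]
  have htd : PySem.Int.truncdiv ((PySem.List.sorted combined (fun x => PySem.List.pyGetD x 0 0) false).length : Int) 5
      = ((population.length / 5 : Nat) : Int) := by
    rw [hslen]; simp [PySem.Int.truncdiv]
  rw [htd, popLoop_eq_take _ _ (by rw [hslen]; exact Nat.div_le_self _ _), hslen]
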